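-- pv_equiv track=rewrite | github.com/ishevche/adventofcode.com | 2023/day13.py | get_palindrome_idx1
-- ===== SOURCE A (Python) =====
-- def get_palindrome_idx1(lst):
--     for i in range(len(lst) - 1):
--         is_ok = True
--         for j in range(min(i + 1, len(lst) - i - 1)):
--             if lst[i - j] != lst[i + j + 1]:
--                 is_ok = False
--                 break
--         if is_ok:
--             return i
--     return -1
-- ===== SOURCE B (Python) =====
-- def get_palindrome_idx1(lst):
--     # Radius-major simultaneous expansion: keep all candidate centers alive at once,
--     # grow the mirror radius m round by round, kill a center on its first mismatch,
--     # and record it as a valid reflection when it reaches its boundary radius.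
--     n = len(lst)
--     alive = [(c, min(c + 1, n - c - 1)) for c in range(n - 1)]
--     best = -1
--     m = 1
--     while alive:
--         nxt = []
--         for c, need in alive:
--             if lst[c - m + 1] != lst[c + m]:
--                 pass
--             elif m == need:
--                 if best == -1 or c < best:
--                     best = c
--             else:
--                 nxt.append((c, need))
--         alive = nxt
--         m += 1
--     return best
-- ===== Notes on version B (the rewrite author's own statement) =====
-- stated objective: alternative
-- what changed: Replaces A's center-major scan (for each split, a fresh inner mirrored scan with a break) by a radius-major simultaneous expansion: one worklist of all candidate centers is grown one radius per round, centers are dropped on their first mismatch and recorded when their palindrome reaches the boundary, and the minimum recorded center is returned.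
import Mathlib
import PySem

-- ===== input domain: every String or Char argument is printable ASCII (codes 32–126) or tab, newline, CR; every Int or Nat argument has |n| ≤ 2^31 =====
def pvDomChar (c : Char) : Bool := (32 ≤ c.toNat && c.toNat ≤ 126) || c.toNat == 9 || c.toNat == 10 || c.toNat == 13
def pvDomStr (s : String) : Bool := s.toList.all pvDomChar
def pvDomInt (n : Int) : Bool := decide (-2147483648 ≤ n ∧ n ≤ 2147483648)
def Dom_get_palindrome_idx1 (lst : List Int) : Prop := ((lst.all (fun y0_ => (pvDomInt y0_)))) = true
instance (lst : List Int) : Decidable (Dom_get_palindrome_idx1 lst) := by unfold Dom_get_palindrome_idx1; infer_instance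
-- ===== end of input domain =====

-- B replaces A's per-split mirrored scan by a radius-major expansion of all centers at once
-- (a worklist shrinking round by round, minimum of the validated centers); objective: alternative, same cost.

-- ===== PORT A =====
-- inner 'for j in range(...)' loop with its break: returns the final is_ok
def pvA_inner (lst : List Int) (i : Int) : List Int → Bool
  | [] => true
  | j :: rest =>
      if PySem.List.pyGetD lst (i - j) 0 ≠ PySem.List.pyGetD lst (i + j + 1) 0 then false
      else pvA_inner lst i rest

-- outer 'for i in range(len(lst) - 1)' loop with its early return
def pvA_outer (lst : List Int) : List Int → Int
  | [] => -1
  | i :: rest =>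
      if pvA_inner lst i (PySem.List.pyRange 0 (min (i + 1) ((lst.length : Int) - i - 1)) 1) then i
      else pvA_outer lst rest

def get_palindrome_idx1 (lst : List Int) : Int :=
  pvA_outer lst (PySem.List.pyRange 0 ((lst.length : Int) - 1) 1)

-- ===== PORT B =====
-- 'if best == -1 or c < best: best = c'
def pvMinUpd (best c : Int) : Int := if best = -1 ∨ c < best then c else best

-- one round of Source B's inner for-loop: processes alive at radius m, returns (nxt, best)
def pvB_round (lst : List Int) (m : Int) : List (Int × Int) → Int → (List (Int × Int) × Int)
  | [], best => ([], best)
  | cn :: rest, best =>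
      if PySem.List.pyGetD lst (cn.1 - m + 1) 0 ≠ PySem.List.pyGetD lst (cn.1 + m) 0 then
        pvB_round lst m rest best
      else if m = cn.2 then
        pvB_round lst m rest (pvMinUpd best cn.1)
      else
        let r := pvB_round lst m rest best
        (cn :: r.1, r.2)

-- 'while alive:' — fuel only makes the loop total; n+1 rounds always suffice (every need ≤ n)
def pvB_while (lst : List Int) : Nat → Int → List (Int × Int) → Int → Int
  | 0, _, _, best => best
  | fuel + 1, m, alive, best =>
      if alive.isEmpty then best
      else
        let r := pvB_round lst m alive best
        pvB_while lst fuel (m + 1) r.1 r.2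

def get_palindrome_idx1_alt (lst : List Int) : Int :=
  pvB_while lst (lst.length + 1) 1
    ((PySem.List.pyRange 0 ((lst.length : Int) - 1) 1).map
      (fun c => (c, min (c + 1) ((lst.length : Int) - c - 1))))
    (-1)

-- ===== PRECONDITION & SPEC =====
def Spec_get_palindrome_idx1 (lst : List Int) (out : Int) : Prop := out = get_palindrome_idx1_alt lst
instance (lst : List Int) (out : Int) : Decidable (Spec_get_palindrome_idx1 lst out) := by unfold Spec_get_palindrome_idx1; infer_instance

-- ===== CLAIM (what is proved, stated in full; the proofs are below) =====
def Claim_equal_get_palindrome_idx1 : Prop := ∀ (lst : List Int), Dom_get_palindrome_idx1 lst → Spec_get_palindrome_idx1 lst (get_palindrome_idx1 lst)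

-- ===== LEMMAS AND PROOFS =====

-- the mirror comparison at center c, radius m (A uses it with j = m - 1)
def pvCond (lst : List Int) (c m : Int) : Bool :=
  decide (PySem.List.pyGetD lst (c - m + 1) 0 = PySem.List.pyGetD lst (c + m) 0)

-- center c survives radii m..need
def pvSurv (lst : List Int) (m c need : Int) : Bool :=
  (PySem.List.pyRange m (need + 1) 1).all (fun j => pvCond lst c j)

def pvCombine (best : Int) (cs : List Int) : Int := cs.foldl pvMinUpd best

lemma pvCombine_cons (b c : Int) (l : List Int) :
    pvCombine b (c :: l) = pvCombine (pvMinUpd b c) l := rfl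

lemma pvA_inner_eq_all (lst : List Int) (i : Int) (js : List Int) :
    pvA_inner lst i js
      = js.all (fun j => decide (PySem.List.pyGetD lst (i - j) 0 = PySem.List.pyGetD lst (i + j + 1) 0)) := by
  induction js with
  | nil => rfl
  | cons j rest ih =>
      simp only [pvA_inner, List.all_cons, ih]
      by_cases h : PySem.List.pyGetD lst (i - j) 0 = PySem.List.pyGetD lst (i + j + 1) 0 <;> simp [h]

-- A's inner test over j ∈ [0, need) is survival over radii m ∈ [1, need]
lemma pvA_inner_surv (lst : List Int) (i need : Int) :
    pvA_inner lst i (PySem.List.pyRange 0 need 1) = pvSurv lst 1 i need := by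
  rw [pvA_inner_eq_all]
  unfold pvSurv
  rw [Bool.eq_iff_iff, List.all_eq_true, List.all_eq_true]
  constructor
  · intro h m hm
    rw [PySem.List.mem_pyRange_one] at hm
    have := h (m - 1) (by rw [PySem.List.mem_pyRange_one]; omega)
    unfold pvCond
    simpa [show i - (m - 1) = i - m + 1 by ring, show i + (m - 1) + 1 = i + m by ring] using this
  · intro h j hj
    rw [PySem.List.mem_pyRange_one] at hj
    have := h (j + 1) (by rw [PySem.List.mem_pyRange_one]; omega)
    unfold pvCond at this
    simpa [show i - (j + 1) + 1 = i - j by ring, show i + (j + 1) = i + j + 1 by ring] using this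

lemma pvSurv_cons (lst : List Int) (m c need : Int) (h : m ≤ need) :
    pvSurv lst m c need = (pvCond lst c m && pvSurv lst (m + 1) c need) := by
  unfold pvSurv
  rw [PySem.List.pyRange_one_cons (by omega : m < need + 1)]
  simp

lemma pvSurv_empty (lst : List Int) (m c need : Int) (h : need < m) :
    pvSurv lst m c need = true := by
  unfold pvSurv
  rw [PySem.List.pyRange_one_eq_nil (by omega : need + 1 ≤ m)]
  rfl

lemma pvMinUpd_comm (b c1 c2 : Int) (h1 : 0 ≤ c1) (h2 : 0 ≤ c2) :
    pvMinUpd (pvMinUpd b c1) c2 = pvMinUpd (pvMinUpd b c2) c1 := by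
  unfold pvMinUpd; split_ifs <;> omega

lemma pvCombine_minUpd (b c : Int) (hc : 0 ≤ c) :
    ∀ xs : List Int, (∀ x ∈ xs, 0 ≤ x) →
      pvCombine (pvMinUpd b c) xs = pvMinUpd (pvCombine b xs) c := by
  intro xs
  induction xs generalizing b with
  | nil => intro _; rfl
  | cons x t ih =>
      intro hx
      have hx0 : 0 ≤ x := hx x (List.mem_cons_self ..)
      simp only [pvCombine, List.foldl_cons] at *
      rw [pvMinUpd_comm b c x hc hx0]
      exact ih (pvMinUpd b x) (fun y hy => hx y (List.mem_cons_of_mem _ hy))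

lemma pvCombine_of_le (b : Int) (hb : 0 ≤ b) :
    ∀ xs : List Int, (∀ x ∈ xs, b ≤ x) → pvCombine b xs = b := by
  intro xs
  induction xs with
  | nil => intro _; rfl
  | cons x t ih =>
      intro hx
      have : pvMinUpd b x = b := by
        unfold pvMinUpd
        have := hx x (List.mem_cons_self ..)
        split_ifs with h
        · omega
        · rfl
      simp only [pvCombine, List.foldl_cons, this]
      exact ih (fun y hy => hx y (List.mem_cons_of_mem _ hy))

-- pulling a pvMinUpd past a pvCombine of nonnegative centers
lemma pvMinUpd_comm_combine (lst : List Int) (m : Int) (best c : Int) (hc : 0 ≤ c)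
    (rest : List (Int × Int)) (hrest : ∀ x ∈ rest, m ≤ x.2 ∧ 0 ≤ x.1) :
    pvCombine (pvMinUpd best c) (rest.filterMap
        (fun cn => if pvCond lst cn.1 m && decide (m = cn.2) then some cn.1 else none))
      = pvMinUpd (pvCombine best (rest.filterMap
        (fun cn => if pvCond lst cn.1 m && decide (m = cn.2) then some cn.1 else none))) c := by
  apply pvCombine_minUpd best c hc
  intro x hx
  rw [List.mem_filterMap] at hx
  obtain ⟨y, hy, hv⟩ := hx
  have := (hrest y hy).2
  split at hv
  · cases hv; exact this
  · cases hv

-- one round, characterised: survivors kept, centers validated this round folded into best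
lemma pvB_round_eq (lst : List Int) (m : Int) :
    ∀ (alive : List (Int × Int)) (best : Int),
      pvB_round lst m alive best =
        (alive.filter (fun cn => pvCond lst cn.1 m && !(decide (m = cn.2))),
         pvCombine best (alive.filterMap
           (fun cn => if pvCond lst cn.1 m && decide (m = cn.2) then some cn.1 else none))) := by
  intro alive
  induction alive with
  | nil => intro best; rfl
  | cons cn rest ih =>
      intro best
      simp only [pvB_round, List.filter_cons, List.filterMap_cons]
      by_cases hc : PySem.List.pyGetD lst (cn.1 - m + 1) 0 = PySem.List.pyGetD lst (cn.1 + m) 0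
      · rw [if_neg (fun h => h hc)]
        by_cases hm : m = cn.2
        · have e1 : (pvCond lst cn.1 m && !(decide (m = cn.2))) = false := by
            simp [hm]
          have e2 : (pvCond lst cn.1 m && decide (m = cn.2)) = true := by
            simp [pvCond, ← hm, hc]
          rw [if_pos hm, ih, e1, e2]
          simp only [Bool.false_eq_true, if_false, if_true, pvCombine_cons]
        · have e1 : (pvCond lst cn.1 m && !(decide (m = cn.2))) = true := by
            simp [pvCond, hc, hm]
          have e2 : (pvCond lst cn.1 m && decide (m = cn.2)) = false := by
            simp [hm]
          rw [if_neg hm]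
          show (cn :: (pvB_round lst m rest best).1, (pvB_round lst m rest best).2) = _
          rw [ih, e1, e2]
          simp only [Bool.false_eq_true, if_false, if_true]
      · rw [if_pos hc]
        have e1 : (pvCond lst cn.1 m && !(decide (m = cn.2))) = false := by
          simp [pvCond, hc]
        have e2 : (pvCond lst cn.1 m && decide (m = cn.2)) = false := by
          simp [pvCond, hc]
        rw [ih, e1, e2]
        simp only [Bool.false_eq_true, if_false]

-- one step of validated/surviving bookkeeping: folding now-validated centers then the
-- survivors' later validations equals folding every center that survives from radius m
lemma pvB_split (lst : List Int) (m : Int) :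
    ∀ (alive : List (Int × Int)) (best : Int),
      (∀ cn ∈ alive, m ≤ cn.2 ∧ 0 ≤ cn.1) →
      pvCombine
          (pvCombine best (alive.filterMap
            (fun cn => if pvCond lst cn.1 m && decide (m = cn.2) then some cn.1 else none)))
          ((alive.filter (fun cn => pvCond lst cn.1 m && !(decide (m = cn.2)))).filterMap
            (fun cn => if pvSurv lst (m + 1) cn.1 cn.2 then some cn.1 else none))
        = pvCombine best (alive.filterMap
            (fun cn => if pvSurv lst m cn.1 cn.2 then some cn.1 else none)) := by
  intro alive
  induction alive with
  | nil => intro best _; rfl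
  | cons cn rest ih =>
      intro best h
      have h1 := h cn (List.mem_cons_self ..)
      have hrest : ∀ x ∈ rest, m ≤ x.2 ∧ 0 ≤ x.1 :=
        fun x hx => h x (List.mem_cons_of_mem _ hx)
      have hsurv := pvSurv_cons lst m cn.1 cn.2 h1.1
      simp only [List.filterMap_cons, List.filter_cons]
      by_cases hc : pvCond lst cn.1 m = true
      · by_cases hm : m = cn.2
        · have hfull : pvSurv lst m cn.1 cn.2 = true := by
            rw [hsurv, pvSurv_empty lst (m + 1) cn.1 cn.2 (by omega)]
            simp [hc]
          have e1 : (pvCond lst cn.1 m && decide (m = cn.2)) = true := by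
            rw [← hm]; simp [hc]
          have e2 : (pvCond lst cn.1 m && !(decide (m = cn.2))) = false := by simp [hm]
          rw [e1, e2, hfull]
          simp only [Bool.false_eq_true, if_false, if_true, pvCombine_cons]
          exact ih (pvMinUpd best cn.1) hrest
        · have e1 : (pvCond lst cn.1 m && decide (m = cn.2)) = false := by simp [hm]
          have e2 : (pvCond lst cn.1 m && !(decide (m = cn.2))) = true := by simp [hc, hm]
          rw [e1, e2, hsurv, hc]
          simp only [Bool.false_eq_true, if_false, if_true, Bool.true_and,
            List.filterMap_cons]
          by_cases hs : pvSurv lst (m + 1) cn.1 cn.2 = true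
          · rw [hs]
            simp only [if_true, pvCombine_cons]
            rw [← pvMinUpd_comm_combine lst m best cn.1 h1.2 rest hrest]
            exact ih (pvMinUpd best cn.1) hrest
          · simp only [Bool.not_eq_true] at hs
            rw [hs]
            simp only [Bool.false_eq_true, if_false]
            exact ih best hrest
      · simp only [Bool.not_eq_true] at hc
        have hfull : pvSurv lst m cn.1 cn.2 = false := by rw [hsurv, hc]; rfl
        have e1 : (pvCond lst cn.1 m && decide (m = cn.2)) = false := by simp [hc]
        have e2 : (pvCond lst cn.1 m && !(decide (m = cn.2))) = false := by simp [hc]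
        rw [e1, e2, hfull]
        simp only [Bool.false_eq_true, if_false]
        exact ih best hrest

-- the whole while-loop: best folded with every center of alive that survives to its boundary
lemma pvB_while_eq (lst : List Int) :
    ∀ (fuel : Nat) (m : Int) (alive : List (Int × Int)) (best : Int),
      (∀ cn ∈ alive, m ≤ cn.2 ∧ cn.2 - m < (fuel : Int) ∧ 0 ≤ cn.1) →
      pvB_while lst fuel m alive best
        = pvCombine best (alive.filterMap
            (fun cn => if pvSurv lst m cn.1 cn.2 then some cn.1 else none)) := by
  intro fuel
  induction fuel with
  | zero =>
      intro m alive best h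
      cases alive with
      | nil => rfl
      | cons cn t =>
          exfalso
          have := h cn (List.mem_cons_self ..)
          simp only [Nat.cast_zero] at this
          omega
  | succ fuel ih =>
      intro m alive best h
      simp only [pvB_while]
      by_cases he : alive.isEmpty
      · rw [if_pos he, List.isEmpty_iff.mp he]; rfl
      · rw [if_neg he, pvB_round_eq]
        rw [ih (m + 1) _ _ (by
          intro cn hcn
          rw [List.mem_filter] at hcn
          obtain ⟨hmem, hf⟩ := hcn
          have h1 := h cn hmem
          have hne : m ≠ cn.2 := by
            intro hmeq
            simp [hmeq] at hf
          refine ⟨by omega, by push_cast at h1 ⊢; omega, h1.2.2⟩)]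
        exact pvB_split lst m alive best (fun cn hcn => ⟨(h cn hcn).1, (h cn hcn).2.2⟩)

-- A's early-return scan over an ascending candidate list is the minimum of the accepted ones
lemma pvA_first (lst : List Int) :
    ∀ cs : List Int, cs.Pairwise (· < ·) → (∀ c ∈ cs, 0 ≤ c) →
      pvA_outer lst cs
        = pvCombine (-1) (cs.filter
            (fun i => pvA_inner lst i (PySem.List.pyRange 0 (min (i + 1) ((lst.length : Int) - i - 1)) 1))) := by
  intro cs
  induction cs with
  | nil => intro _ _; rfl
  | cons c t ih =>
      intro hp hn
      have hc0 : 0 ≤ c := hn c (List.mem_cons_self ..)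
      rw [List.pairwise_cons] at hp
      by_cases hcnd : pvA_inner lst c (PySem.List.pyRange 0 (min (c + 1) ((lst.length : Int) - c - 1)) 1) = true
      · simp only [pvA_outer, hcnd, if_pos rfl, List.filter_cons, hcnd, if_pos rfl]
        have h1 : pvMinUpd (-1) c = c := by unfold pvMinUpd; simp
        simp only [pvCombine, List.foldl_cons, h1]
        exact (pvCombine_of_le c hc0 _ (by
          intro x hx
          rw [List.mem_filter] at hx
          exact le_of_lt (hp.1 x hx.1))).symm
      · simp only [Bool.not_eq_true] at hcnd
        simp only [pvA_outer, hcnd, Bool.false_eq_true, if_false, List.filter_cons, hcnd,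
          Bool.false_eq_true, if_false]
        exact ih hp.2 (fun x hx => hn x (List.mem_cons_of_mem _ hx))

lemma pvFilterMap_if (p : Int → Bool) :
    ∀ l : List Int, l.filterMap (fun c => if p c then some c else none) = l.filter p := by
  intro l
  induction l with
  | nil => rfl
  | cons c t ih =>
      simp only [List.filterMap_cons, List.filter_cons]
      by_cases h : p c = true <;> simp [h, ih]

-- ===== VERDICT (by name: the statement is the Claim_ definition above) =====
theorem get_palindrome_idx1_spec : Claim_equal_get_palindrome_idx1 := by
  intro lst _
  unfold Spec_get_palindrome_idx1 get_palindrome_idx1 get_palindrome_idx1_alt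
  set n : Int := (lst.length : Int) with hn
  rw [pvA_first lst _ (PySem.List.pairwise_lt_pyRange_one _ _)
    (by intro c hc; rw [PySem.List.mem_pyRange_one] at hc; omega)]
  rw [pvB_while_eq lst _ _ _ _ (by
    intro cn hcn
    rw [List.mem_map] at hcn
    obtain ⟨c, hc, rfl⟩ := hcn
    rw [PySem.List.mem_pyRange_one] at hc
    refine ⟨by show (1:Int) ≤ min (c + 1) (n - c - 1); omega, ?_, by simpa using hc.1⟩
    show min (c + 1) (n - c - 1) - 1 < ((lst.length + 1 : Nat) : Int)
    push_cast
    omega)]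
  rw [List.filterMap_map]
  have : ∀ c ∈ PySem.List.pyRange 0 (n - 1) 1,
      pvA_inner lst c (PySem.List.pyRange 0 (min (c + 1) (n - c - 1)) 1)
        = pvSurv lst 1 c (min (c + 1) (n - c - 1)) := by
    intro c _
    exact pvA_inner_surv lst c _
  rw [List.filter_congr this, ← pvFilterMap_if]
  rfl
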